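-- pv_equiv track=rewrite | github.com/devinshende/mahjong_stats | mjstats.py | calc_total_points
-- ===== SOURCE A (Python) =====
-- def calc_total_points(value_counts):
-- 	total = 0
-- 	chicken = 0
-- 	for w, c in value_counts.items():
-- 		if w != "0":
-- 			total += int(w) * c
-- 		else:
-- 			chicken += c
-- 	return total, chicken
-- ===== SOURCE B (Python) =====
-- def calc_total_points(value_counts):
-- 	items = list(value_counts.items())
--
-- 	def contrib(w, c):
-- 		# each entry contributes a (total, chicken) pair
-- 		return (0, c) if w == "0" else (int(w) * c, 0)
--
-- 	def go(i):
-- 		# recursively fold the tail first, then add this entry's contribution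
-- 		if i == len(items):
-- 			return (0, 0)
-- 		t, z = go(i + 1)
-- 		p, q = contrib(*items[i])
-- 		return (t + p, z + q)
--
-- 	return go(0)
-- ===== Notes on version B (the rewrite author's own statement) =====
-- stated objective: alternative
-- what changed: B replaces A's forward loop over two scalar accumulators by a recursion that folds the item list back-to-front, mapping each entry to a (total, chicken) contribution pair and adding pairs componentwise.
import Mathlib
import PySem

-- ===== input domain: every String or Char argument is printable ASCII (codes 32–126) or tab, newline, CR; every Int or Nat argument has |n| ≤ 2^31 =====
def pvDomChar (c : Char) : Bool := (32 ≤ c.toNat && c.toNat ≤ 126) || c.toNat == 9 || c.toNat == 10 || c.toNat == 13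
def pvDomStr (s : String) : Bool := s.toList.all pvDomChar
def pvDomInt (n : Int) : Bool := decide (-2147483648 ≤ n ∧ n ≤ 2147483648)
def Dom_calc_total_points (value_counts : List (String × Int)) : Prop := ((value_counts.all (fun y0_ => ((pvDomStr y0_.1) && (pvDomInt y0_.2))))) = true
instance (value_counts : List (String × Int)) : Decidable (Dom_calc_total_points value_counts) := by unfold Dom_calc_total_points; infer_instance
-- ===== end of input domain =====

-- B folds the item list back-to-front by structural recursion, mapping each entry to a
-- (total, chicken) contribution pair added componentwise; objective: alternative decomposition.


-- ===== PORT A =====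
-- int(w) is (PySem.Int.ofStr? w).getD 0; Pre_ guarantees the parse succeeds (Python raises ValueError otherwise)
def calc_total_points (value_counts : List (String × Int)) : Int × Int :=
  value_counts.foldl
    (fun (s : Int × Int) wc =>
      if wc.1 ≠ "0" then (s.1 + ((PySem.Int.ofStr? wc.1).getD 0) * wc.2, s.2)
      else (s.1, s.2 + wc.2))
    (0, 0)

-- ===== PORT B =====
-- each entry's (total, chicken) contribution pair
def pvContrib (w : String) (c : Int) : Int × Int :=
  if w == "0" then (0, c) else (((PySem.Int.ofStr? w).getD 0) * c, 0)

-- go: fold the tail first, then add this entry's contribution componentwise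
def pvGo : List (String × Int) → Int × Int
  | [] => (0, 0)
  | wc :: rest =>
    let tz := pvGo rest
    let pq := pvContrib wc.1 wc.2
    (tz.1 + pq.1, tz.2 + pq.2)

def calc_total_points_alt (value_counts : List (String × Int)) : Int × Int :=
  pvGo value_counts

-- ===== PRECONDITION & SPEC =====
-- Pre_ excludes exactly the inputs on which the Python A raises ValueError: a key other than "0"
-- that int() cannot parse.
def Pre_calc_total_points (value_counts : List (String × Int)) : Prop :=
  ∀ p ∈ value_counts, p.1 = "0" ∨ (PySem.Int.ofStr? p.1).isSome
instance (value_counts : List (String × Int)) : Decidable (Pre_calc_total_points value_counts) := by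
  unfold Pre_calc_total_points; infer_instance

def pvWitness_calc_total_points : (List (String × Int)) := [("3", 2), ("0", 1), ("-4", 7)]

def Spec_calc_total_points (value_counts : List (String × Int)) (out : Int × Int) : Prop := out = calc_total_points_alt value_counts
instance (value_counts : List (String × Int)) (out : Int × Int) : Decidable (Spec_calc_total_points value_counts out) := by unfold Spec_calc_total_points; infer_instance

-- ===== CLAIM (what is proved, stated in full; the proofs are below) =====
def Claim_equal_calc_total_points : Prop := ∀ (value_counts : List (String × Int)), Dom_calc_total_points value_counts → Pre_calc_total_points value_counts → Spec_calc_total_points value_counts (calc_total_points value_counts)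

-- ===== LEMMAS AND PROOFS =====

-- A's forward fold from state (a, b) adds B's back-to-front result componentwise
theorem foldA_eq_go (vc : List (String × Int)) (a b : Int) :
    vc.foldl
      (fun (s : Int × Int) wc =>
        if wc.1 ≠ "0" then (s.1 + ((PySem.Int.ofStr? wc.1).getD 0) * wc.2, s.2)
        else (s.1, s.2 + wc.2)) (a, b)
      = (a + (pvGo vc).1, b + (pvGo vc).2) := by
  induction vc generalizing a b with
  | nil => simp [pvGo]
  | cons h t ih =>
    by_cases hw : h.1 = "0"
    · rw [List.foldl_cons, if_neg (not_not_intro hw), ih]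
      simp [pvGo, pvContrib, hw]
      ring
    · rw [List.foldl_cons, if_pos hw, ih]
      simp only [pvGo, pvContrib]
      rw [if_neg (by simpa using hw)]
      simp only [Prod.mk.injEq]
      constructor <;> ring

-- ===== VERDICT (by name: the statement is the Claim_ definition above) =====
theorem calc_total_points_spec : Claim_equal_calc_total_points := by
  intro vc _ _
  unfold Spec_calc_total_points calc_total_points calc_total_points_alt
  rw [foldA_eq_go]
  simp
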